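-- pv_equiv track=rewrite | github.com/Chris-Owusu/codeSignal | sortByHeight.py | solution
-- ===== SOURCE A (Python) =====
-- def solution(a):
--     ind = sorted(i for i in a if i != -1)
--     newList = []
--     idx = 0
--
--     for el in a:
--         if el == -1:
--             newList.append(el)
--         else:
--             newList.append(ind[idx])
--             idx += 1
--
--     return newList
-- ===== SOURCE B (Python) =====
-- def solution(a):
--     # Selection instead of sorting: repeatedly extract the minimum remaining
--     # non-(-1) value and place it at each non-(-1) slot in a single pass.
--     vals = [v for v in a if v != -1]
--     out = []
--     for el in a:
--         if el == -1:
--             out.append(-1)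
--         else:
--             m = min(vals)
--             vals.remove(m)
--             out.append(m)
--     return out
-- ===== Notes on version B (the rewrite author's own statement) =====
-- stated objective: alternative
-- what changed: B never sorts: it keeps the multiset of non-(-1) values and, in one pass, repeatedly extracts the minimum (min + remove) to fill each non-(-1) slot, instead of A's pre-sorted list consumed by a running cursor.
import Mathlib
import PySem

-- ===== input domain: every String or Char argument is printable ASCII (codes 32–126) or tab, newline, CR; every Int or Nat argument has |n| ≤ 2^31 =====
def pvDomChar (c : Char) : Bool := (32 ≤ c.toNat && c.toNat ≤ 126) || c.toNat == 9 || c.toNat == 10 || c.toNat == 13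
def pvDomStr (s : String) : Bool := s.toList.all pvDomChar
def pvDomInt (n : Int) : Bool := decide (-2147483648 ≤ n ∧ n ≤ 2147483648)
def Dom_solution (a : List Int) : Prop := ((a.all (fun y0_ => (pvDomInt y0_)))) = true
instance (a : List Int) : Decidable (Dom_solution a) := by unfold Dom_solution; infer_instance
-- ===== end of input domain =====

-- B never sorts: it repeatedly extracts the minimum remaining non-(-1) value (min + remove)
-- in a single interleaving pass, instead of A's pre-sorted list consumed by a cursor (alternative).


-- ===== PORT A =====
def solution (a : List Int) : List Int :=
  let ind := PySem.List.sorted (a.filter (fun i => decide (i ≠ -1))) (fun i => i) false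
  (a.foldl (fun (st : List Int × Int) el =>
      if el = -1 then (st.1 ++ [el], st.2)
      else (st.1 ++ [(PySem.List.pyGet? ind st.2).getD 0], st.2 + 1)) ([], 0)).1

-- ===== PORT B =====
def solution_alt (a : List Int) : List Int :=
  let vals := a.filter (fun v => decide (v ≠ -1))
  (a.foldl (fun (st : List Int × List Int) el =>
      if el = -1 then (st.1, st.2 ++ [(-1)])
      else
        let m := (PySem.List.min? st.1 (fun x => x)).getD 0
        ((PySem.List.remove? st.1 m).getD [], st.2 ++ [m])) (vals, [])).2

-- ===== PRECONDITION & SPEC =====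
def Spec_solution (a : List Int) (out : List Int) : Prop := out = solution_alt a
instance (a : List Int) (out : List Int) : Decidable (Spec_solution a out) := by unfold Spec_solution; infer_instance

-- ===== CLAIM (what is proved, stated in full; the proofs are below) =====
def Claim_equal_solution : Prop := ∀ (a : List Int), Dom_solution a → Spec_solution a (solution a)

-- ===== LEMMAS AND PROOFS =====

-- the common result: replace the non-(-1) entries of a by successive elements of v
def mergeV : List Int → List Int → List Int
  | [], _ => []
  | x :: xs, v => if x = -1 then x :: mergeV xs v else v.headI :: mergeV xs v.tail

theorem loopA_eq_merge (a : List Int) (ind : List Int) (idx : Int) (acc : List Int)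
    (h0 : 0 ≤ idx)
    (hlen : idx.toNat + a.countP (fun i => decide (i ≠ -1)) ≤ ind.length) :
    (a.foldl (fun (st : List Int × Int) el =>
        if el = -1 then (st.1 ++ [el], st.2)
        else (st.1 ++ [(PySem.List.pyGet? ind st.2).getD 0], st.2 + 1)) (acc, idx)).1
      = acc ++ mergeV a (ind.drop idx.toNat) := by
  induction a generalizing acc idx with
  | nil => simp [mergeV]
  | cons x xs ih =>
    by_cases h : x = -1
    · have hlen' : idx.toNat + xs.countP (fun i => decide (i ≠ -1)) ≤ ind.length := by
        simpa [List.countP_cons, h] using hlen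
      simp only [List.foldl_cons, if_pos h]
      rw [ih idx (acc ++ [x]) h0 hlen']
      simp [mergeV, h]
    · have hcnt : idx.toNat + (xs.countP (fun i => decide (i ≠ -1)) + 1) ≤ ind.length := by
        simpa [List.countP_cons, h] using hlen
      have hlt : idx.toNat < ind.length := by omega
      have hget : (PySem.List.pyGet? ind idx).getD 0 = (ind.drop idx.toNat).headI := by
        rw [PySem.List.pyGet?_of_nonneg _ h0, List.getElem?_eq_getElem hlt,
          List.drop_eq_getElem_cons hlt]
        rfl
      have htail : (ind.drop idx.toNat).tail = ind.drop (idx + 1).toNat := by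
        rw [List.tail_drop]; congr 1; omega
      simp only [List.foldl_cons, if_neg h]
      rw [ih (idx + 1) _ (by omega) (by omega)]
      simp [mergeV, h, hget, htail]

-- extracting the minimum of a nonempty list yields the head of its sorted order,
-- and removing it leaves a list whose sorted order is the tail
theorem sorted_cons_min (vals : List Int) (m : Int) (t : List Int)
    (hs : PySem.List.sorted vals (fun x => x) false = m :: t) :
    (PySem.List.min? vals (fun x => x)).getD 0 = m ∧
      PySem.List.sorted (vals.erase m) (fun x => x) false = t := by
  have hperm : (m :: t).Perm vals := by
    rw [← hs]; exact PySem.List.sorted_perm vals (fun x => x) false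
  have hmmem : m ∈ vals := hperm.mem_iff.1 (by simp)
  obtain ⟨m0, hm0⟩ : ∃ m0, PySem.List.min? vals (fun x => x) = some m0 := by
    cases h : PySem.List.min? vals (fun x => x) with
    | none =>
      exact absurd ((PySem.List.min?_eq_none_iff vals (fun x => x)).1 h) (by rintro rfl; simp at hmmem)
    | some m0 => exact ⟨m0, rfl⟩
  have hm0mem : m0 ∈ vals := PySem.List.min?_mem hm0
  have hm0min : ∀ y ∈ vals, m0 ≤ y := fun y hy => PySem.List.min?_isMin hm0 y hy
  have hhead : ∀ y ∈ vals, m ≤ y := PySem.List.key_head_sorted_le vals (fun x => x) hs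
  have heq : m0 = m := le_antisymm (hm0min m hmmem) (hhead m0 hm0mem)
  constructor
  · simp [hm0, heq]
  · have hpt : t.Perm (vals.erase m) := by
      have := (List.erase_cons_head m t) ▸ hperm.erase m
      exact this
    have hpw : t.Pairwise (fun a b => a ≤ b) := by
      have := PySem.List.sorted_pairwise vals (fun x => x)
      rw [hs] at this
      exact this.of_cons
    exact PySem.List.sorted_id_eq_of_perm_of_pairwise _ _ hpt hpw

theorem loopB_eq_merge (a : List Int) (vals : List Int) (acc : List Int)
    (hlen : a.countP (fun i => decide (i ≠ -1)) ≤ vals.length) :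
    (a.foldl (fun (st : List Int × List Int) el =>
        if el = -1 then (st.1, st.2 ++ [(-1)])
        else
          let m := (PySem.List.min? st.1 (fun x => x)).getD 0
          ((PySem.List.remove? st.1 m).getD [], st.2 ++ [m])) (vals, acc)).2
      = acc ++ mergeV a (PySem.List.sorted vals (fun x => x) false) := by
  induction a generalizing vals acc with
  | nil => simp [mergeV]
  | cons x xs ih =>
    by_cases h : x = -1
    · have hlen' : xs.countP (fun i => decide (i ≠ -1)) ≤ vals.length := by
        simpa [List.countP_cons, h] using hlen
      simp only [List.foldl_cons, if_pos h]
      rw [ih vals (acc ++ [(-1)]) hlen']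
      simp [mergeV, h]
    · have hcnt : xs.countP (fun i => decide (i ≠ -1)) + 1 ≤ vals.length := by
        simpa [List.countP_cons, h] using hlen
      have hvne : vals ≠ [] := by
        intro hv; rw [hv] at hcnt; simp at hcnt
      obtain ⟨m, t, hs⟩ : ∃ m t, PySem.List.sorted vals (fun x => x) false = m :: t := by
        cases hsv : PySem.List.sorted vals (fun x => x) false with
        | nil => exact absurd ((PySem.List.sorted_eq_nil_iff vals (fun x => x) false).1 hsv) hvne
        | cons m t => exact ⟨m, t, rfl⟩
      obtain ⟨hmin, hst⟩ := sorted_cons_min vals m t hs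
      have hperm : (m :: t).Perm vals := by
        rw [← hs]; exact PySem.List.sorted_perm vals (fun x => x) false
      have hmmem : m ∈ vals := hperm.mem_iff.1 (by simp)
      have hrem : (PySem.List.remove? vals m).getD [] = vals.erase m := by
        rw [PySem.List.remove?_eq_some_erase vals m hmmem]; rfl
      have hlene : xs.countP (fun i => decide (i ≠ -1)) ≤ (vals.erase m).length := by
        rw [List.length_erase_of_mem hmmem]; omega
      simp only [List.foldl_cons, if_neg h]
      rw [hmin, hrem, ih (vals.erase m) (acc ++ [m]) hlene, hst]
      simp [mergeV, h, hs]

-- ===== VERDICT (by name: the statement is the Claim_ definition above) =====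
theorem solution_spec : Claim_equal_solution := by
  intro a _
  unfold Spec_solution solution solution_alt
  have hfeq : (fun v : Int => decide (v ≠ -1)) = (fun i : Int => decide (i ≠ -1)) := rfl
  set vals := a.filter (fun i => decide (i ≠ -1)) with hvals
  have hlenv : (PySem.List.sorted vals (fun i => i) false).length
      = a.countP (fun i => decide (i ≠ -1)) := by
    rw [PySem.List.length_sorted]
    exact List.countP_eq_length_filter.symm
  rw [loopA_eq_merge a _ 0 [] (by omega) (by omega),
    loopB_eq_merge a vals [] (by rw [hvals]; exact le_of_eq List.countP_eq_length_filter)]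
  simp
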